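-- pv_equiv track=rewrite | github.com/joasgard/Asgard-HL-Basisstrategy | shared/db/database.py | _convert_placeholders
-- ===== SOURCE A (Python) =====
-- def _convert_placeholders(query: str) -> str:
--     """Convert ? placeholders to $1, $2, ... for asyncpg."""
--     parts: list[str] = []
--     idx = 0
--     i = 0
--     while i < len(query):
--         ch = query[i]
--         if ch == '?':
--             idx += 1
--             parts.append(f'${idx}')
--         elif ch == "'" or ch == '"':
--             # skip quoted strings
--             quote = ch
--             parts.append(ch)
--             i += 1
--             while i < len(query) and query[i] != quote:
--                 parts.append(query[i])
--                 i += 1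
--             if i < len(query):
--                 parts.append(query[i])
--         else:
--             parts.append(ch)
--         i += 1
--     return ''.join(parts)
-- ===== SOURCE B (Python) =====
-- def _convert_placeholders(query: str) -> str:
--     """Convert ? placeholders to $1, $2, ... for asyncpg."""
--     parts: list[str] = []
--     n = 0
--     mode = None  # current open quote character, or None
--     for ch in query:
--         if mode is None:
--             if ch == '?':
--                 n += 1
--                 parts.append(f'${n}')
--             else:
--                 parts.append(ch)
--                 if ch == "'" or ch == '"':
--                     mode = ch
--         else:
--             parts.append(ch)
--             if ch == mode:
--                 mode = None
--     return ''.join(parts)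
-- ===== Notes on version B (the rewrite author's own statement) =====
-- stated objective: simpler
-- what changed: Replaced the index-based while-loop with a nested quote-skipping inner loop by a single for-loop over the characters carrying an explicit open-quote state variable (a small finite-state machine).
import Mathlib
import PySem

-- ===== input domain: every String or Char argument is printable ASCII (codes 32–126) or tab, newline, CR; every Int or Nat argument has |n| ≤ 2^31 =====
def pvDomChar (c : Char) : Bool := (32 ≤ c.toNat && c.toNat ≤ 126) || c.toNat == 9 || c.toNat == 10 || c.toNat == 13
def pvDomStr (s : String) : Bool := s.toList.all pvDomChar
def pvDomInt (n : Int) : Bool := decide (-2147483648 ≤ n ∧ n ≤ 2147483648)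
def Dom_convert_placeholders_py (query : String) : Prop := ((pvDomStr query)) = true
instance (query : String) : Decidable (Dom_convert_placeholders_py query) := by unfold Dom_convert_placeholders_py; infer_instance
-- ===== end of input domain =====

-- B replaces A's index-driven while-loop (with its nested quote-skipping inner loop) by a
-- single fold over the characters carrying an explicit "open quote" state (objective: simpler).

-- ===== PORT A =====
-- inner "while i < len(query) and query[i] != quote" loop of A
def pvSkipQuote (cs : List Char) (i : Nat) (q : Char) (parts : List Char) : Nat × List Char :=
  if h : i < cs.length then
    if cs[i] = q then (i, parts)
    else pvSkipQuote cs (i + 1) q (parts ++ [cs[i]])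
  else (i, parts)
termination_by cs.length - i

-- used only for termination of the outer loop (cited in its decreasing_by)
theorem pvSkipQuote_ge (cs : List Char) (i : Nat) (q : Char) (parts : List Char) :
    i ≤ (pvSkipQuote cs i q parts).1 := by
  fun_induction pvSkipQuote
  · simp
  · simp_all; omega
  · simp

-- outer "while i < len(query)" loop of A; parts is the joined character stream
def pvLoopA (cs : List Char) (idx : Int) (i : Nat) (parts : List Char) : List Char :=
  if h : i < cs.length then
    let ch := cs[i]
    if ch = '?' then
      pvLoopA cs (idx + 1) (i + 1) (parts ++ ('$' :: (PySem.Int.toStr (idx + 1)).toList))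
    else if ch = '\'' ∨ ch = '"' then
      let r := pvSkipQuote cs (i + 1) ch (parts ++ [ch])
      let parts2 := if h2 : r.1 < cs.length then r.2 ++ [cs[r.1]] else r.2
      pvLoopA cs idx (r.1 + 1) parts2
    else pvLoopA cs idx (i + 1) (parts ++ [ch])
  else parts
termination_by cs.length - i
decreasing_by
  · omega
  · have := pvSkipQuote_ge cs (i + 1) cs[i] (parts ++ [cs[i]]); omega
  · omega

def convert_placeholders_py (query : String) : String :=
  String.ofList (pvLoopA query.toList 0 0 [])

-- ===== PORT B =====
-- one step of B's for-loop: state = (counter n, current open quote mode, output stream)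
def pvStepB (st : Int × Option Char × List Char) (ch : Char) : Int × Option Char × List Char :=
  match st with
  | (n, none, out) =>
    if ch = '?' then (n + 1, none, out ++ ('$' :: (PySem.Int.toStr (n + 1)).toList))
    else (n, if ch = '\'' ∨ ch = '"' then some ch else none, out ++ [ch])
  | (n, some q, out) => (n, if ch = q then none else some q, out ++ [ch])

def convert_placeholders_py_alt (query : String) : String :=
  String.ofList (query.toList.foldl pvStepB (0, none, [])).2.2

-- ===== PRECONDITION & SPEC =====
def Spec_convert_placeholders_py (query : String) (out : String) : Prop := out = convert_placeholders_py_alt query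
instance (query : String) (out : String) : Decidable (Spec_convert_placeholders_py query out) := by unfold Spec_convert_placeholders_py; infer_instance

-- ===== CLAIM (what is proved, stated in full; the proofs are below) =====
def Claim_equal_convert_placeholders_py : Prop := ∀ (query : String), Dom_convert_placeholders_py query → Spec_convert_placeholders_py query (convert_placeholders_py query)

-- ===== LEMMAS AND PROOFS =====

-- A's inner quote-skip loop corresponds to B's fold while the quote state is open
theorem pvSkip_fold (cs : List Char) (i : Nat) (q : Char) (idx : Int) (parts : List Char) :
    List.foldl pvStepB (idx, some q, parts) (cs.drop i) =
      (if h : (pvSkipQuote cs i q parts).1 < cs.length then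
        List.foldl pvStepB
          (idx, none, (pvSkipQuote cs i q parts).2 ++ [cs[(pvSkipQuote cs i q parts).1]])
          (cs.drop ((pvSkipQuote cs i q parts).1 + 1))
      else (idx, some q, (pvSkipQuote cs i q parts).2)) := by
  fun_induction pvSkipQuote cs i q parts with
  | case1 i parts h heq =>
    rw [List.drop_eq_getElem_cons h, List.foldl_cons]
    have hst : pvStepB (idx, some q, parts) cs[i] = (idx, none, parts ++ [cs[i]]) := by
      simp [pvStepB, heq]
    rw [hst]
    simp [h, heq]
  | case2 i parts h heq ih =>
    rw [List.drop_eq_getElem_cons h, List.foldl_cons]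
    have hst : pvStepB (idx, some q, parts) cs[i] = (idx, some q, parts ++ [cs[i]]) := by
      simp [pvStepB, heq]
    rw [hst]; exact ih
  | case3 i parts h =>
    simp [h, List.drop_eq_nil_of_le (by omega : cs.length ≤ i)]

-- A's outer loop corresponds to B's fold in the "no open quote" state
theorem pvLoop_fold (cs : List Char) (idx : Int) (i : Nat) (parts : List Char) :
    pvLoopA cs idx i parts = (List.foldl pvStepB (idx, none, parts) (cs.drop i)).2.2 := by
  fun_induction pvLoopA cs idx i parts with
  | case1 idx i parts h ch heq ih =>
    rw [List.drop_eq_getElem_cons h, List.foldl_cons]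
    have heq' : cs[i] = '?' := heq
    have hst : pvStepB (idx, none, parts) cs[i] =
        (idx + 1, none, parts ++ ('$' :: (PySem.Int.toStr (idx + 1)).toList)) := by
      simp [pvStepB, heq']
    rw [hst]; exact ih
  | case2 idx i parts h ch hne hq r parts2 ih =>
    rw [List.drop_eq_getElem_cons h, List.foldl_cons]
    have hne' : ¬cs[i] = '?' := hne
    have hq' : cs[i] = '\'' ∨ cs[i] = '"' := hq
    have hst : pvStepB (idx, none, parts) cs[i] = (idx, some cs[i], parts ++ [cs[i]]) := by
      simp [pvStepB, hne', hq']
    rw [hst, pvSkip_fold]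
    have hP : parts2 = (if h2 : r.1 < cs.length then r.2 ++ [cs[r.1]] else r.2) := rfl
    have hr : r = pvSkipQuote cs (i + 1) cs[i] (parts ++ [cs[i]]) := rfl
    rw [hP, hr] at ih ⊢
    by_cases h2 : (pvSkipQuote cs (i + 1) cs[i] (parts ++ [cs[i]])).1 < cs.length
    · rw [dif_pos h2] at ih
      conv_rhs => rw [dif_pos h2]
      rw [dif_pos h2]
      exact ih
    · rw [dif_neg h2] at ih
      conv_rhs => rw [dif_neg h2]
      rw [dif_neg h2]
      have hdrop : cs.drop ((pvSkipQuote cs (i + 1) cs[i] (parts ++ [cs[i]])).1 + 1) = [] :=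
        List.drop_eq_nil_of_le (by omega)
      rw [ih, hdrop]
      rfl
  | case3 idx i parts h ch hne hq ih =>
    rw [List.drop_eq_getElem_cons h, List.foldl_cons]
    have hne' : ¬cs[i] = '?' := hne
    have hq' : ¬(cs[i] = '\'' ∨ cs[i] = '"') := hq
    have hst : pvStepB (idx, none, parts) cs[i] = (idx, none, parts ++ [cs[i]]) := by
      simp [pvStepB, hne', hq']
    rw [hst]; exact ih
  | case4 idx i parts hge =>
    simp [List.drop_eq_nil_of_le (by omega : cs.length ≤ i)]

-- ===== VERDICT (by name: the statement is the Claim_ definition above) =====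
theorem convert_placeholders_py_spec : Claim_equal_convert_placeholders_py := by
  intro query _
  unfold Spec_convert_placeholders_py convert_placeholders_py convert_placeholders_py_alt
  rw [pvLoop_fold query.toList 0 0 [], List.drop_zero]
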